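-- pv_equiv track=rewrite | github.com/SLB-DeN/opensvc | lib/rcUtilities.py | cmdline2list
-- ===== SOURCE A (Python) =====
-- def cmdline2list(cmdline):
--     """
--     Translate a command line string into a list of arguments, using
--     using the same rules as the MS C runtime:
--
--     1) Arguments are delimited by white space, which is either a
--        space or a tab.
--
--     2) A string surrounded by double quotation marks is
--        interpreted as a single argument, regardless of white space
--        contained within.  A quoted string can be embedded in an
--        argument.
--
--     3) A double quotation mark preceded by a backslash is
--        interpreted as a literal double quotation mark.
--
--     4) Backslashes are interpreted literally, unless they
--        immediately precede a double quotation mark.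
--
--     5) If backslashes immediately precede a double quotation mark,
--        every pair of backslashes is interpreted as a literal
--        backslash.  If the number of backslashes is odd, the last
--        backslash escapes the next double quotation mark as
--        described in rule 3.
--     """
--
--     # See
--     # http://msdn.microsoft.com/library/en-us/vccelng/htm/progs_12.asp
--
--     # Step 1: Translate all literal quotes into QUOTE.  Justify number
--     # of backspaces before quotes.
--     tokens = []
--     bs_buf = ""
--     QUOTE = 1 # \", literal quote
--     for c in cmdline:
--         if c == '\\':
--             bs_buf += c
--         elif c == '"' and bs_buf:
--             # A quote preceded by some number of backslashes.
--             num_bs = len(bs_buf)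
--             tokens.extend(["\\"] * (num_bs//2))
--             bs_buf = ""
--             if num_bs % 2:
--                 # Odd.  Quote should be placed literally in array
--                 tokens.append(QUOTE)
--             else:
--                 # Even.  This quote serves as a string delimiter
--                 tokens.append('"')
--
--         else:
--             # Normal character (or quote without any preceding
--             # backslashes)
--             if bs_buf:
--                 # We have backspaces in buffer.  Output these.
--                 tokens.extend(list(bs_buf))
--                 bs_buf = ""
--
--             tokens.append(c)
--
--     # Step 2: split into arguments
--     result = [] # Array of strings
--     quoted = False
--     arg = [] # Current argument
--     tokens.append(" ")
--     for c in tokens: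
--         if c == '"':
--             # Toggle quote status
--             quoted = not quoted
--         elif c == QUOTE:
--             arg.append('"')
--         elif c in (' ', '\t'):
--             if quoted:
--                 arg.append(c)
--             else:
--                 # End of argument.  Output, if anything.
--                 if arg:
--                     result.append(''.join(arg))
--                     arg = []
--         else:
--             # Normal character
--             arg.append(c)
--
--     return result
-- ===== SOURCE B (Python) =====
-- def cmdline2list(cmdline):
--     """Single-pass state machine over cmdline (MS C runtime rules):
--     counts pending backslashes instead of building a token list first."""
--     result = []
--     arg = []
--     quoted = False
--     bs = 0
--     for c in cmdline:
--         if c == '\\':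
--             bs += 1
--         elif c == '"':
--             arg.extend(['\\'] * (bs // 2))
--             if bs % 2:
--                 arg.append('"')
--             else:
--                 quoted = not quoted
--             bs = 0
--         else:
--             arg.extend(['\\'] * bs)
--             bs = 0
--             if c in (' ', '\t') and not quoted:
--                 if arg:
--                     result.append(''.join(arg))
--                     arg = []
--             else:
--                 arg.append(c)
--     # trailing backslashes are dropped; an unterminated quoted argument too
--     if arg and not quoted:
--         result.append(''.join(arg))
--     return result
-- ===== Notes on version B (the rewrite author's own statement) =====
-- stated objective: simpler
-- what changed: B replaces A's two passes (build a token list with a sentinel QUOTE token, then split it) by one single-pass state machine that just counts pending backslashes, never materialising the intermediate token list.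
import Mathlib
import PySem

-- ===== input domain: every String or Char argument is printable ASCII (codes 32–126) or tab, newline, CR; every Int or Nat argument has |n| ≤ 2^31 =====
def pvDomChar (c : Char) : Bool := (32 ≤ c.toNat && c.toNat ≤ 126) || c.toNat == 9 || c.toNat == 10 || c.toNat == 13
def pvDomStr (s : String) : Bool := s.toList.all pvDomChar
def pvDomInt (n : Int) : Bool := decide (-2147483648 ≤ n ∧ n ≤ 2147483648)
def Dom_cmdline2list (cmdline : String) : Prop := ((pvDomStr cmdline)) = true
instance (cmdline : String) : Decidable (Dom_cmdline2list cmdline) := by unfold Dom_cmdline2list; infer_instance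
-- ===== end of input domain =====

-- B is a single-pass state machine with a backslash counter, replacing A's two passes
-- (tokenize with a sentinel QUOTE token, then split); objective: simpler, same O(n) cost.

-- ===== PORT A =====
-- token: either an ordinary character token or the sentinel QUOTE (Python's int 1)
inductive Tok where
  | ch : Char → Tok
  | quote : Tok
deriving DecidableEq, Repr

-- step 1 loop body: bs_buf is the buffered backslashes (a Python string, here List Char)
def cmdline2listStep1 (st : List Tok × List Char) (c : Char) : List Tok × List Char :=
  let tokens := st.1
  let bs_buf := st.2
  if c = '\\' then (tokens, bs_buf ++ [c])
  else if c = '"' ∧ bs_buf ≠ [] then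
    let num_bs := bs_buf.length
    let tokens := tokens ++ List.replicate (num_bs / 2) (Tok.ch '\\')
    if num_bs % 2 = 1 then (tokens ++ [Tok.quote], [])
    else (tokens ++ [Tok.ch '"'], [])
  else
    let tokens := if bs_buf ≠ [] then tokens ++ bs_buf.map Tok.ch else tokens
    (tokens ++ [Tok.ch c], [])

-- step 2 loop body: state is (result, quoted, arg)
def cmdline2listStep2 (st : List String × Bool × List Char) (t : Tok) : List String × Bool × List Char :=
  let result := st.1
  let quoted := st.2.1
  let arg := st.2.2
  if t = Tok.ch '"' then (result, !quoted, arg)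
  else if t = Tok.quote then (result, quoted, arg ++ ['"'])
  else
    match t with
    | Tok.quote => st  -- unreachable: handled above
    | Tok.ch c =>
      if c = ' ' ∨ c = '\t' then
        if quoted then (result, quoted, arg ++ [c])
        else if arg ≠ [] then (result ++ [String.ofList arg], quoted, [])
        else (result, quoted, arg)
      else (result, quoted, arg ++ [c])

def cmdline2list (cmdline : String) : List String :=
  let s1 := cmdline.toList.foldl cmdline2listStep1 ([], [])
  let s2 := (s1.1 ++ [Tok.ch ' ']).foldl cmdline2listStep2 ([], false, [])
  s2.1

-- ===== PORT B =====
-- single-pass state: (bs, quoted, arg, result)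
def cmdline2listAltStep (st : Nat × Bool × List Char × List String) (c : Char) :
    Nat × Bool × List Char × List String :=
  let bs := st.1
  let quoted := st.2.1
  let arg := st.2.2.1
  let result := st.2.2.2
  if c = '\\' then (bs + 1, quoted, arg, result)
  else if c = '"' then
    let arg := arg ++ List.replicate (bs / 2) '\\'
    if bs % 2 = 1 then (0, quoted, arg ++ ['"'], result)
    else (0, !quoted, arg, result)
  else
    let arg := arg ++ List.replicate bs '\\'
    if (c = ' ' ∨ c = '\t') ∧ quoted = false then
      if arg ≠ [] then (0, quoted, [], result ++ [String.ofList arg])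
      else (0, quoted, arg, result)
    else (0, quoted, arg ++ [c], result)

def cmdline2list_alt (cmdline : String) : List String :=
  let st := cmdline.toList.foldl cmdline2listAltStep (0, false, [], [])
  if st.2.2.1 ≠ [] ∧ st.2.1 = false then st.2.2.2 ++ [String.ofList st.2.2.1] else st.2.2.2

-- ===== PRECONDITION & SPEC =====
def Spec_cmdline2list (cmdline : String) (out : List String) : Prop := out = cmdline2list_alt cmdline
instance (cmdline : String) (out : List String) : Decidable (Spec_cmdline2list cmdline out) := by unfold Spec_cmdline2list; infer_instance

-- ===== CLAIM (what is proved, stated in full; the proofs are below) =====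
def Claim_equal_cmdline2list : Prop := ∀ (cmdline : String), Dom_cmdline2list cmdline → Spec_cmdline2list cmdline (cmdline2list cmdline)

-- ===== LEMMAS AND PROOFS =====

-- step1 only appends to the token accumulator
theorem step1_acc (toks : List Tok) (buf : List Char) (c : Char) :
    cmdline2listStep1 (toks, buf) c
      = (toks ++ (cmdline2listStep1 ([], buf) c).1, (cmdline2listStep1 ([], buf) c).2) := by
  simp only [cmdline2listStep1]
  split_ifs <;> simp

theorem foldl1_acc (cs : List Char) (toks : List Tok) (buf : List Char) :
    List.foldl cmdline2listStep1 (toks, buf) cs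
      = (toks ++ (List.foldl cmdline2listStep1 ([], buf) cs).1,
         (List.foldl cmdline2listStep1 ([], buf) cs).2) := by
  induction cs generalizing toks buf with
  | nil => simp
  | cons c cs ih =>
    simp only [List.foldl_cons]
    rw [step1_acc, ih, ih (cmdline2listStep1 ([], buf) c).1]
    simp

-- consuming k backslash tokens in step 2 just appends k backslashes to arg
theorem foldl2_bs (k : Nat) (st : List String × Bool × List Char) :
    List.foldl cmdline2listStep2 st (List.replicate k (Tok.ch '\\'))
      = (st.1, st.2.1, st.2.2 ++ List.replicate k '\\') := by
  induction k generalizing st with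
  | zero => simp
  | succ k ih =>
    rw [List.replicate_succ, List.foldl_cons, ih]
    simp [cmdline2listStep2, List.replicate_succ]

-- main invariant: A's step-2 state after the tokens emitted so far equals B's state,
-- and A's pending bs_buf is exactly bs backslashes
theorem main_inv (cs : List Char) (n : Nat) (q : Bool) (arg : List Char) (res : List String) :
    (List.foldl cmdline2listStep2 (res, q, arg)
        (List.foldl cmdline2listStep1 ([], List.replicate n '\\') cs).1
      = ((List.foldl cmdline2listAltStep (n, q, arg, res) cs).2.2.2,
         (List.foldl cmdline2listAltStep (n, q, arg, res) cs).2.1,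
         (List.foldl cmdline2listAltStep (n, q, arg, res) cs).2.2.1))
    ∧ (List.foldl cmdline2listStep1 ([], List.replicate n '\\') cs).2
      = List.replicate (List.foldl cmdline2listAltStep (n, q, arg, res) cs).1 '\\' := by
  induction cs generalizing n q arg res with
  | nil => simp
  | cons c cs ih =>
    by_cases hbs : c = '\\'
    · subst hbs
      simp only [List.foldl_cons, cmdline2listStep1, cmdline2listAltStep]
      simpa [← List.replicate_succ'] using ih (n + 1) q arg res
    · by_cases hq : c = '"'
      · subst hq
        rcases Nat.eq_zero_or_pos n with hn | hn
        · subst hn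
          have hs1 : cmdline2listStep1 ([], List.replicate 0 '\\') '"' = ([Tok.ch '"'], []) := by
            simp [cmdline2listStep1]
          have hsB : cmdline2listAltStep (0, q, arg, res) '"' = (0, !q, arg, res) := by
            simp [cmdline2listAltStep]
          rw [List.foldl_cons, List.foldl_cons, hs1, hsB, foldl1_acc]
          simpa [cmdline2listStep2, List.foldl_append] using ih 0 (!q) arg res
        · have hne : List.replicate n '\\' ≠ ([] : List Char) := by
            simp [List.replicate_eq_nil_iff]; omega
          by_cases hodd : n % 2 = 1
          · have hs1 : cmdline2listStep1 ([], List.replicate n '\\') '"'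
                = (List.replicate (n / 2) (Tok.ch '\\') ++ [Tok.quote], []) := by
              simp [cmdline2listStep1, hne, hodd]
            have hsB : cmdline2listAltStep (n, q, arg, res) '"'
                = (0, q, arg ++ List.replicate (n / 2) '\\' ++ ['"'], res) := by
              simp [cmdline2listAltStep, hodd]
            rw [List.foldl_cons, List.foldl_cons, hs1, hsB, foldl1_acc]
            simpa [cmdline2listStep2, List.foldl_append, foldl2_bs]
              using ih 0 q (arg ++ List.replicate (n / 2) '\\' ++ ['"']) res
          · have hs1 : cmdline2listStep1 ([], List.replicate n '\\') '"'
                = (List.replicate (n / 2) (Tok.ch '\\') ++ [Tok.ch '"'], []) := by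
              simp [cmdline2listStep1, hne, hodd]
            have hsB : cmdline2listAltStep (n, q, arg, res) '"'
                = (0, !q, arg ++ List.replicate (n / 2) '\\', res) := by
              simp [cmdline2listAltStep, hodd]
            rw [List.foldl_cons, List.foldl_cons, hs1, hsB, foldl1_acc]
            simpa [cmdline2listStep2, List.foldl_append, foldl2_bs]
              using ih 0 (!q) (arg ++ List.replicate (n / 2) '\\') res
      · -- ordinary character (not backslash, not quote)
        have hs1 : cmdline2listStep1 ([], List.replicate n '\\') c
            = (List.replicate n (Tok.ch '\\') ++ [Tok.ch c], []) := by
          rcases Nat.eq_zero_or_pos n with hn | hn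
          · subst hn; simp [cmdline2listStep1, hbs, hq]
          · have hne : List.replicate n '\\' ≠ ([] : List Char) := by
              simp [List.replicate_eq_nil_iff]; omega
            simp [cmdline2listStep1, hbs, hq, hne]
        rw [List.foldl_cons, List.foldl_cons, hs1, foldl1_acc]
        by_cases hsp : (c = ' ' ∨ c = '\t') ∧ q = false
        · by_cases harg : arg ++ List.replicate n '\\' = []
          · have hsB : cmdline2listAltStep (n, q, arg, res) c = (0, q, arg ++ List.replicate n '\\', res) := by
              simp [cmdline2listAltStep, hbs, hq, hsp, harg]
            rw [hsB]
            simpa [cmdline2listStep2, List.foldl_append, foldl2_bs, hbs, hq, hsp.1, hsp.2, harg]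
              using ih 0 q (arg ++ List.replicate n '\\') res
          · have hsB : cmdline2listAltStep (n, q, arg, res) c
                = (0, q, [], res ++ [String.ofList (arg ++ List.replicate n '\\')]) := by
              simp [cmdline2listAltStep, hbs, hq, hsp, harg]
            rw [hsB]
            simpa [cmdline2listStep2, List.foldl_append, foldl2_bs, hbs, hq, hsp.1, hsp.2, harg]
              using ih 0 q ([] : List Char) (res ++ [String.ofList (arg ++ List.replicate n '\\')])
        · have hsB : cmdline2listAltStep (n, q, arg, res) c
              = (0, q, arg ++ List.replicate n '\\' ++ [c], res) := by
            simp [cmdline2listAltStep, hbs, hq, hsp]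
          rw [hsB]
          have h2 : cmdline2listStep2 (res, q, arg ++ List.replicate n '\\') (Tok.ch c)
              = (res, q, arg ++ List.replicate n '\\' ++ [c]) := by
            rcases not_and_or.mp hsp with h | h
            · simp [cmdline2listStep2, hq, h]
            · have hqt : q = true := by cases q <;> simp_all
              by_cases hc : c = ' ' ∨ c = '\t' <;> simp [cmdline2listStep2, hq, hc, hqt]
          simpa [List.foldl_append, foldl2_bs, h2]
            using ih 0 q (arg ++ List.replicate n '\\' ++ [c]) res

-- ===== VERDICT (by name: the statement is the Claim_ definition above) =====
theorem cmdline2list_spec : Claim_equal_cmdline2list := by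
  intro cmdline _
  unfold Spec_cmdline2list cmdline2list cmdline2list_alt
  obtain ⟨h1, -⟩ := main_inv cmdline.toList 0 false [] []
  simp only [List.replicate_zero] at h1
  simp only []
  rw [List.foldl_append, h1]
  rcases hA : List.foldl cmdline2listAltStep (0, false, [], []) cmdline.toList with ⟨bs, q, arg, res⟩
  by_cases hqt : q = true
  · simp [cmdline2listStep2, hqt]
  · have hqf : q = false := by cases q <;> simp_all
    by_cases harg : arg = []
    · simp [cmdline2listStep2, hqf, harg]
    · simp [cmdline2listStep2, hqf, harg]
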